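-- pv_equiv track=rewrite | github.com/DanielPastorMiguel/VDBauto | utiles.py | get_rindex
-- ===== SOURCE A (Python) =====
-- def get_rindex(lista, valor):
--     """Devuelve el indice de la primera aparicion de un item que no sea el string pasado. Ej: [a, None, b, c, None, None] Si pasamos None devuelve -> 3"""
--     lista.reverse()
--     for i in range(len(lista)):
--         if (lista[i] != valor):
--             lista.reverse()
--             return len(lista) - i - 1
--     lista.reverse()
--     return len(lista)
-- ===== SOURCE B (Python) =====
-- def get_rindex(lista, valor):
--     """Devuelve el indice de la primera aparicion de un item que no sea el string pasado. Ej: [a, None, b, c, None, None] Si pasamos None devuelve -> 3"""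
--     hits = [i for i, x in enumerate(lista) if x != valor]
--     return hits[-1] if hits else len(lista)
-- ===== Notes on version B (the rewrite author's own statement) =====
-- stated objective: alternative
-- what changed: B first builds the list of all indices whose element differs from valor with a comprehension and then returns its last entry (len(lista) if empty), instead of A's reverse-in-place, indexed scan for the first mismatch with an early return and index arithmetic, and reverse back.
import Mathlib
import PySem

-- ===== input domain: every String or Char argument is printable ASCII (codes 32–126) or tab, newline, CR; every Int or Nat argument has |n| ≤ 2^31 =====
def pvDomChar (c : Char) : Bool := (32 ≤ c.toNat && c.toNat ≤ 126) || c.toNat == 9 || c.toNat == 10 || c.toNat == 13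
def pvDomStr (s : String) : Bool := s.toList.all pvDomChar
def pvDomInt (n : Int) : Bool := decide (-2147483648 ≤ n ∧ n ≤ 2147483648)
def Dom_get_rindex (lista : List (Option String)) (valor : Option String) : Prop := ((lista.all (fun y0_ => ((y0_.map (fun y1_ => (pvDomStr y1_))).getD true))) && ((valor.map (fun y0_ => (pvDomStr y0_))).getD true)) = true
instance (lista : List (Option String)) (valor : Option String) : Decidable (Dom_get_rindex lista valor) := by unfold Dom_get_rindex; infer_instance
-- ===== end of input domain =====

-- B builds the list of all mismatch indices and returns its last entry (len if empty),
-- instead of A's reverse-in-place scan with early return; A's two reverses cancel, so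
-- only the return value matters (the argument list is observationally unchanged).
-- ===== PORT A =====
-- loop over the reversed list: `r` is the not-yet-scanned tail of lista.reverse, `i` the loop index
def pvALoop (n : Nat) (valor : Option String) : List (Option String) → Nat → Int
  | [], _ => (n : Int)
  | x :: xs, i => if x ≠ valor then (n : Int) - (i : Int) - 1 else pvALoop n valor xs (i + 1)

def get_rindex (lista : List (Option String)) (valor : Option String) : Int :=
  pvALoop lista.length valor lista.reverse 0

-- ===== PORT B =====
def get_rindex_alt (lista : List (Option String)) (valor : Option String) : Int :=
  let hits : List Int :=
    (PySem.List.enumerate lista).filterMap (fun p => if p.2 ≠ valor then some p.1 else none)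
  match hits.getLast? with
  | some i => i
  | none => (lista.length : Int)

-- ===== PRECONDITION & SPEC =====
def Spec_get_rindex (lista : List (Option String)) (valor : Option String) (out : Int) : Prop := out = get_rindex_alt lista valor
instance (lista : List (Option String)) (valor : Option String) (out : Int) : Decidable (Spec_get_rindex lista valor out) := by unfold Spec_get_rindex; infer_instance

-- ===== CLAIM (what is proved, stated in full; the proofs are below) =====
def Claim_equal_get_rindex : Prop := ∀ (lista : List (Option String)) (valor : Option String), Dom_get_rindex lista valor → Spec_get_rindex lista valor (get_rindex lista valor)

-- ===== LEMMAS AND PROOFS =====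

-- index of the first element ≠ valor
def pvFirstNe (valor : Option String) : List (Option String) → Option Nat
  | [] => none
  | x :: xs => if x ≠ valor then some 0 else (pvFirstNe valor xs).map (· + 1)

theorem pvALoop_eq (n : Nat) (valor : Option String) (r : List (Option String)) (i : Nat) :
    pvALoop n valor r i =
      match pvFirstNe valor r with
      | some k => (n : Int) - (i + k : Nat) - 1
      | none => (n : Int) := by
  induction r generalizing i with
  | nil => simp [pvALoop, pvFirstNe]
  | cons x xs ih =>
    simp only [pvALoop, pvFirstNe]
    by_cases h : x ≠ valor
    · simp [h]
    · simp only [if_neg h, ih]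
      cases hx : pvFirstNe valor xs <;> simp [hx] <;> push_cast <;> ring

def pvHits (valor : Option String) (l : List (Option String)) : List Int :=
  (PySem.List.enumerate l).filterMap (fun p => if p.2 ≠ valor then some p.1 else none)

theorem pvHits_getLast? (valor : Option String) (l : List (Option String)) :
    (pvHits valor l).getLast? =
      (pvFirstNe valor l.reverse).map (fun k => (l.length : Int) - 1 - (k : Int)) := by
  induction l using List.reverseRecOn with
  | nil => simp [pvHits, pvFirstNe, PySem.List.enumerate]
  | append_singleton l x ih =>
    have he : PySem.List.enumerate (l ++ [x]) 0
        = PySem.List.enumerate l 0 ++ [((l.length : Int), x)] := by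
      rw [PySem.List.enumerate_append]
      simp [PySem.List.enumerate_cons, PySem.List.enumerate_nil]
    simp only [pvHits] at ih ⊢
    rw [he, List.filterMap_append]
    simp only [List.reverse_append, List.reverse_singleton, List.singleton_append, pvFirstNe]
    by_cases h : x ≠ valor
    · simp [h, List.filterMap]
    · simp only [if_neg h]
      simp only [List.filterMap, if_neg h, List.append_nil, ih]
      cases hx : pvFirstNe valor l.reverse <;> simp [hx] <;> push_cast <;> ring

-- ===== VERDICT (by name: the statement is the Claim_ definition above) =====
theorem get_rindex_spec : Claim_equal_get_rindex := by
  intro lista valor _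
  unfold Spec_get_rindex get_rindex get_rindex_alt
  rw [pvALoop_eq]
  have h := pvHits_getLast? valor lista
  unfold pvHits at h
  cases hx : pvFirstNe valor lista.reverse <;>
    rw [hx] at h <;> simp only [hx, Option.map_some, Option.map_none, Option.bind_some,
      Option.bind_none, Option.map_eq_map, Option.pure_def, Option.bind_eq_bind] at h <;>
    simp only [h] <;> try (push_cast; ring)
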